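-- pv_equiv track=rewrite | github.com/inesqmorais/Foundations-of-Programming-Project | Entrega2.py | figura
-- ===== SOURCE A (Python) =====
-- def figura(digrm,chave):
--     """
--     Esta funcao recebe dois argumentos uma cadeia de caracteres
--     com duas letras, digrm, e uma chave e devolve um tuplo de 3 elementos da forma
--     (fig, pos1, pos2) em que fig e a figura determinada pelas letras de digrm, l, c ou r
--     (linha, coluna ou rectangulo) e pos1 e pos2 sao as posicoes ocupadas na chave
--     pela primeira e segunda letra de digrm, respectivamente.
--     """
--     for linha in range(len(chave)):                     #percorre as linhas
--         for coluna in range(len(chave[linha])):         #percorre as colunas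
--             if digrm[0]==str(chave[linha][coluna]):     # se a primeira letra da cadeia de caracteres que a funcao recebe
--                 pos1=(linha,coluna)                     # for igual a uma letra na chave retorna a posicao dessa letra na chave
--             if digrm[1]==str(chave[linha][coluna]):     #se a segundaletra da cadeia de caracteres que a funcao recebe
--                 pos2=(linha,coluna)                     # for igual a uma letra na chave retorna a posicao dessa letra na chave
--     if pos1[0]==pos2[0]:
--         fig='l'                               #se a posicao da linha de ambas as letras for igual a figura e l (linha)
--     elif pos1[1]==pos2[1]:
--         fig='c'                               #se a posicao da coluna de ambas as letras for igual a figura e c (coluna)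
--     else:
--         fig='r'                               #se nem a posicao da linha nem da coluna de ambas letras for igual a figura e r
--     return(fig,pos1,pos2)
-- ===== SOURCE B (Python) =====
-- def figura(digrm, chave):
--     # Two staged reverse searches with early exit: the first match scanning the
--     # grid backwards (rows high->low, cells high->low) is the last forward
--     # occurrence, which is exactly the position A's overwriting scan keeps.
--     def ultima(letra):
--         for r in range(len(chave) - 1, -1, -1):
--             linha = chave[r]
--             for c in range(len(linha) - 1, -1, -1):
--                 if letra == str(linha[c]):
--                     return (r, c)
--         raise LookupError(letra)
--     pos1 = ultima(digrm[0])
--     pos2 = ultima(digrm[1])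
--     if pos1[0] == pos2[0]:
--         fig = 'l'
--     elif pos1[1] == pos2[1]:
--         fig = 'c'
--     else:
--         fig = 'r'
--     return (fig, pos1, pos2)
-- ===== Notes on version B (the rewrite author's own statement) =====
-- stated objective: faster
-- what changed: B replaces A's single forward pass that overwrites both positions at every matching cell by two staged backward searches (one per letter), each returning at its first match (= the last forward occurrence) instead of scanning the whole grid.
import Mathlib
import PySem

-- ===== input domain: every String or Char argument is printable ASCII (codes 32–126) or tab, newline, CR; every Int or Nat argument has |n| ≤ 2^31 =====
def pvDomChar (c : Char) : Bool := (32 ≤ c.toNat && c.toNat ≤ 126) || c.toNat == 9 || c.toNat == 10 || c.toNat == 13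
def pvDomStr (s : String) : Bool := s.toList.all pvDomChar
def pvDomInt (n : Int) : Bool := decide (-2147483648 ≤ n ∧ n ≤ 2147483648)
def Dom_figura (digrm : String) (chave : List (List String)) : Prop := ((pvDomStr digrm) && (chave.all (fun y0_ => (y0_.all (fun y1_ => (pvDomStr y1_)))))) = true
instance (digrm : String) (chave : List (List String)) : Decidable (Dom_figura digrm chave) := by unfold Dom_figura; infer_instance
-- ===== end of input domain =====

-- B replaces A's full forward overwriting scan by two staged backward searches, one per
-- letter, each returning at its first match (the last forward occurrence); measured faster.

-- ===== PORT A =====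
-- A's `digrm[i] == str(cell)`: the optional character digrm[i] read as a one-character
-- string compared with the cell string (false when digrm[i] would raise IndexError)
def cellEqA (o : Option Char) (s : String) : Bool :=
  match o with
  | some ch => s.toList == [ch]
  | none => false

def figura (digrm : String) (chave : List (List String)) : String × (Int × Int) × (Int × Int) :=
  let st :=
    (PySem.List.enumerate chave).foldl (fun st li =>
      (PySem.List.enumerate li.2).foldl (fun st co =>
        let st1 := if cellEqA (PySem.Str.pyGet? digrm 0) co.2 then (some (li.1, co.1), st.2) else st
        if cellEqA (PySem.Str.pyGet? digrm 1) co.2 then (st1.1, some (li.1, co.1)) else st1)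
        st)
      ((none, none) : Option (Int × Int) × Option (Int × Int))
  match st.1, st.2 with
  | some pos1, some pos2 =>
      (if pos1.1 = pos2.1 then "l" else if pos1.2 = pos2.2 then "c" else "r", pos1, pos2)
  | _, _ => ("", (0, 0), (0, 0))   -- Python raises UnboundLocalError/IndexError here; outside Pre_

-- ===== PORT B =====
-- Source B's inner backward loop `for c in range(len(linha)-1,-1,-1)`: first match of the
-- letter (`letra == str(linha[c])`) over the reversed enumerated cells of one row
def findRow (ch : Char) (r : Int) : List (Int × String) → Option (Int × Int)
  | [] => none
  | co :: rest => if co.2.toList == [ch] then some (r, co.1) else findRow ch r rest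

-- Source B's outer backward loop over rows (rows already reversed by the caller)
def findLast (ch : Char) : List (Int × List String) → Option (Int × Int)
  | [] => none
  | li :: rest =>
    match findRow ch li.1 (PySem.List.enumerate li.2).reverse with
    | some p => some p
    | none => findLast ch rest

def figura_alt (digrm : String) (chave : List (List String)) : String × (Int × Int) × (Int × Int) :=
  let rows := (PySem.List.enumerate chave).reverse
  match PySem.Str.pyGet? digrm 0 with
  | none => ("", (0, 0), (0, 0))      -- IndexError in Python; outside Pre_
  | some a =>
    match PySem.Str.pyGet? digrm 1 with
    | none => ("", (0, 0), (0, 0))    -- IndexError in Python; outside Pre_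
    | some b =>
      match findLast a rows with
      | none => ("", (0, 0), (0, 0))  -- LookupError in Python; outside Pre_
      | some pos1 =>
        match findLast b rows with
        | none => ("", (0, 0), (0, 0))
        | some pos2 =>
          (if pos1.1 = pos2.1 then "l" else if pos1.2 = pos2.2 then "c" else "r", pos1, pos2)

-- ===== PRECONDITION & SPEC =====
-- Pre_ excludes exactly the inputs on which Python A raises: digrm shorter than 2 characters
-- (IndexError / UnboundLocalError) or a letter of digrm matching no cell (UnboundLocalError).
def Pre_figura (digrm : String) (chave : List (List String)) : Prop :=
  2 ≤ digrm.toList.length ∧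
  (∃ row ∈ chave, ∃ x ∈ row, x.toList = digrm.toList.take 1) ∧
  (∃ row ∈ chave, ∃ x ∈ row, x.toList = (digrm.toList.drop 1).take 1)
instance (digrm : String) (chave : List (List String)) : Decidable (Pre_figura digrm chave) := by unfold Pre_figura; infer_instance

def pvWitness_figura : String × List (List String) := ("ab", [["a", "b"], ["c", "d"]])

def Spec_figura (digrm : String) (chave : List (List String)) (out : String × (Int × Int) × (Int × Int)) : Prop := out = figura_alt digrm chave
instance (digrm : String) (chave : List (List String)) (out : String × (Int × Int) × (Int × Int)) : Decidable (Spec_figura digrm chave out) := by unfold Spec_figura; infer_instance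

-- ===== CLAIM (what is proved, stated in full; the proofs are below) =====
def Claim_equal_figura : Prop := ∀ (digrm : String) (chave : List (List String)), Dom_figura digrm chave → Pre_figura digrm chave → Spec_figura digrm chave (figura digrm chave)

-- ===== LEMMAS AND PROOFS =====

theorem findRow_append (ch : Char) (r : Int) (xs ys : List (Int × String)) :
    findRow ch r (xs ++ ys) = (findRow ch r xs).or (findRow ch r ys) := by
  induction xs with
  | nil => simp [findRow]
  | cons co rest ih =>
    by_cases h : co.2.toList == [ch] <;> simp [findRow, h, ih]

theorem findLast_append (ch : Char) (xs ys : List (Int × List String)) :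
    findLast ch (xs ++ ys) = (findLast ch xs).or (findLast ch ys) := by
  induction xs with
  | nil => simp [findLast]
  | cons li rest ih =>
    cases h : findRow ch li.1 (PySem.List.enumerate li.2).reverse <;>
      simp [findLast, h, ih]

-- A's inner loop: each projection of its state equals B's backward first-match search
-- over the cells processed so far, falling back on the incoming state
theorem inner_proj (c0 c1 : Char) (cells : List (Int × String)) (r : Int)
    (st : Option (Int × Int) × Option (Int × Int)) :
    (cells.foldl (fun st co =>
        let st1 := if cellEqA (some c0) co.2 then (some (r, co.1), st.2) else st
        if cellEqA (some c1) co.2 then (st1.1, some (r, co.1)) else st1) st).1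
      = (findRow c0 r cells.reverse).or st.1 ∧
    (cells.foldl (fun st co =>
        let st1 := if cellEqA (some c0) co.2 then (some (r, co.1), st.2) else st
        if cellEqA (some c1) co.2 then (st1.1, some (r, co.1)) else st1) st).2
      = (findRow c1 r cells.reverse).or st.2 := by
  induction cells generalizing st with
  | nil => simp [findRow]
  | cons co rest ih =>
    simp only [List.foldl_cons, List.reverse_cons, findRow_append, Option.or_assoc]
    obtain ⟨ih1, ih2⟩ := ih (st :=
      (let st1 := if cellEqA (some c0) co.2 then (some (r, co.1), st.2) else st
       if cellEqA (some c1) co.2 then (st1.1, some (r, co.1)) else st1))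
    refine ⟨ih1.trans ?_, ih2.trans ?_⟩ <;>
      by_cases h0 : co.2.toList == [c0] <;> by_cases h1 : co.2.toList == [c1] <;>
        simp [findRow, cellEqA, h0, h1]

-- … and A's outer loop likewise, against B's backward row search
theorem outer_proj (c0 c1 : Char) (rows : List (Int × List String))
    (st : Option (Int × Int) × Option (Int × Int)) :
    (rows.foldl (fun st li =>
        (PySem.List.enumerate li.2).foldl (fun st co =>
          let st1 := if cellEqA (some c0) co.2 then (some (li.1, co.1), st.2) else st
          if cellEqA (some c1) co.2 then (st1.1, some (li.1, co.1)) else st1) st) st).1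
      = (findLast c0 rows.reverse).or st.1 ∧
    (rows.foldl (fun st li =>
        (PySem.List.enumerate li.2).foldl (fun st co =>
          let st1 := if cellEqA (some c0) co.2 then (some (li.1, co.1), st.2) else st
          if cellEqA (some c1) co.2 then (st1.1, some (li.1, co.1)) else st1) st) st).2
      = (findLast c1 rows.reverse).or st.2 := by
  induction rows generalizing st with
  | nil => simp [findLast]
  | cons li rest ih =>
    simp only [List.foldl_cons, List.reverse_cons, findLast_append, Option.or_assoc]
    obtain ⟨ih1, ih2⟩ := ih (st :=
      (PySem.List.enumerate li.2).foldl (fun st co =>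
        let st1 := if cellEqA (some c0) co.2 then (some (li.1, co.1), st.2) else st
        if cellEqA (some c1) co.2 then (st1.1, some (li.1, co.1)) else st1) st)
    obtain ⟨p1, p2⟩ := inner_proj c0 c1 (PySem.List.enumerate li.2) li.1 st
    constructor
    · rw [ih1, p1]
      cases h : findRow c0 li.1 (PySem.List.enumerate li.2).reverse <;>
        simp [findLast, h]
    · rw [ih2, p2]
      cases h : findRow c1 li.1 (PySem.List.enumerate li.2).reverse <;>
        simp [findLast, h]

theorem findRow_isSome (ch : Char) (r : Int) (cells : List (Int × String))
    (h : ∃ co ∈ cells, co.2.toList = [ch]) : (findRow ch r cells).isSome := by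
  induction cells with
  | nil => simp_all
  | cons co rest ih =>
    obtain ⟨c, hc, hcell⟩ := h
    rcases List.mem_cons.mp hc with heq | hmem
    · subst heq; simp [findRow, hcell]
    · by_cases h0 : co.2.toList == [ch] <;> simp [findRow, h0]
      exact ih ⟨c, hmem, hcell⟩

theorem findLast_isSome (ch : Char) (rows : List (Int × List String))
    (h : ∃ li ∈ rows, ∃ co ∈ PySem.List.enumerate li.2, co.2.toList = [ch]) :
    (findLast ch rows).isSome := by
  induction rows with
  | nil => simp_all
  | cons hd rest ih =>
    cases hfr : findRow ch hd.1 (PySem.List.enumerate hd.2).reverse with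
    | some p => simp [findLast, hfr]
    | none =>
      simp only [findLast, hfr]
      obtain ⟨l, hl, co, hco, hcell⟩ := h
      rcases List.mem_cons.mp hl with heq | hmem
      · exfalso
        have hs := findRow_isSome ch hd.1 (PySem.List.enumerate hd.2).reverse
          ⟨co, List.mem_reverse.mpr (heq ▸ hco), hcell⟩
        simp [hfr] at hs
      · exact ih ⟨l, hmem, co, hco, hcell⟩

-- presence of a matching cell in chave, restated over the enumerated rows/cells
theorem any_to_enum (ch : Char) (chave : List (List String))
    (h : ∃ row ∈ chave, ∃ x ∈ row, x.toList = [ch]) :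
    ∃ li ∈ PySem.List.enumerate chave, ∃ co ∈ PySem.List.enumerate li.2, co.2.toList = [ch] := by
  obtain ⟨row, hrow, x, hx, hcell⟩ := h
  have hr : row ∈ (PySem.List.enumerate chave).map (·.2) := by
    rw [PySem.List.map_snd_enumerate]; exact hrow
  obtain ⟨li, hli, hli2⟩ := List.mem_map.mp hr
  have hc : x ∈ (PySem.List.enumerate li.2).map (·.2) := by
    rw [PySem.List.map_snd_enumerate]; rw [hli2]; exact hx
  obtain ⟨co, hco, hco2⟩ := List.mem_map.mp hc
  exact ⟨li, hli, co, hco, by rw [hco2]; exact hcell⟩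

-- ===== VERDICT (by name: the statement is the Claim_ definition above) =====
theorem figura_spec : Claim_equal_figura := by
  intro digrm chave _ hpre
  obtain ⟨hlen, hp0, hp1⟩ := hpre
  have hg0 : PySem.Str.pyGet? digrm 0 = digrm.toList[0]? := by
    simpa using PySem.Str.pyGet?_natCast (s := digrm) (n := 0)
  have hg1 : PySem.Str.pyGet? digrm 1 = digrm.toList[1]? := by
    simpa using PySem.Str.pyGet?_natCast (s := digrm) (n := 1)
  have h0 : digrm.toList[0]? = some (digrm.toList[0]'(by omega)) := List.getElem?_eq_getElem (by omega)
  have h1 : digrm.toList[1]? = some (digrm.toList[1]'(by omega)) := List.getElem?_eq_getElem (by omega)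
  have ht0 : digrm.toList.take 1 = [digrm.toList[0]'(by omega)] := by
    rw [List.take_one, List.head?_eq_getElem?, h0]; rfl
  have ht1 : (digrm.toList.drop 1).take 1 = [digrm.toList[1]'(by omega)] := by
    rw [List.take_one, List.head?_eq_getElem?, List.getElem?_drop, h1]; rfl
  rw [ht0] at hp0
  rw [ht1] at hp1
  unfold Spec_figura
  simp only [figura, figura_alt, hg0, hg1, h0, h1]
  obtain ⟨e1, e2⟩ := outer_proj (digrm.toList[0]'(by omega)) (digrm.toList[1]'(by omega))
    (PySem.List.enumerate chave) ((none, none) : Option (Int × Int) × Option (Int × Int))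
  have hs1 := findLast_isSome (digrm.toList[0]'(by omega)) (PySem.List.enumerate chave).reverse
    (by obtain ⟨li, hli, rest⟩ := any_to_enum _ chave hp0
        exact ⟨li, List.mem_reverse.mpr hli, rest⟩)
  have hs2 := findLast_isSome (digrm.toList[1]'(by omega)) (PySem.List.enumerate chave).reverse
    (by obtain ⟨li, hli, rest⟩ := any_to_enum _ chave hp1
        exact ⟨li, List.mem_reverse.mpr hli, rest⟩)
  obtain ⟨p1, hp1'⟩ := Option.isSome_iff_exists.mp hs1
  obtain ⟨p2, hp2'⟩ := Option.isSome_iff_exists.mp hs2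
  rw [e1, e2, hp1', hp2']
  simp
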